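-- pv_equiv track=rewrite | github.com/wzgrx/ComfyUI-Apt_Preset | NodeCollect/text_font2img.py | parse_text_input
-- ===== SOURCE A (Python) =====
-- def parse_text_input(text_input, frame_count):
--     structured_format = False
--     frame_text_dict = {}
--     lines = [line for line in text_input.split('\n') if line.strip()]
--     if all(':' in line and line.split(':')[0].strip().replace('"', '').isdigit() for line in lines):
--         structured_format = True
--         for line in lines:
--             parts = line.split(':', 1)
--             if len(parts) == 2:
--                 frame_number = parts[0].strip().replace('"', '')
--                 text = parts[1].strip().replace('"', '').replace(',', '')
--                 frame_text_dict[frame_number] = text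
--     else:
--         frame_text_dict = {str(i): text_input for i in range(1, frame_count + 1)}
--     return frame_text_dict, structured_format
-- ===== SOURCE B (Python) =====
-- def _collect(raw_lines):
--     # Single pass: skip blanks, bail out with None on the first malformed line,
--     # otherwise accumulate frame_number -> text.
--     table = {}
--     for line in raw_lines:
--         if not line.strip():
--             continue
--         if ':' not in line or not line.split(':')[0].strip().replace('"', '').isdigit():
--             return None
--         parts = line.split(':', 1)
--         if len(parts) == 2:
--             table[parts[0].strip().replace('"', '')] = parts[1].strip().replace('"', '').replace(',', '')
--     return table
--
-- def parse_text_input(text_input, frame_count):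
--     table = _collect(text_input.split('\n'))
--     if table is None:
--         return dict.fromkeys(map(str, range(1, frame_count + 1)), text_input), False
--     return table, True
-- ===== Notes on version B (the rewrite author's own statement) =====
-- stated objective: alternative
-- what changed: Replaces A's two-pass structure (a full all() validation pass followed by a separate build loop) with a helper that makes one pass over the raw lines, skipping blanks and returning None (discarding the partial table) at the first malformed line, plus a dict.fromkeys/map fallback instead of a comprehension.
import Mathlib
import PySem

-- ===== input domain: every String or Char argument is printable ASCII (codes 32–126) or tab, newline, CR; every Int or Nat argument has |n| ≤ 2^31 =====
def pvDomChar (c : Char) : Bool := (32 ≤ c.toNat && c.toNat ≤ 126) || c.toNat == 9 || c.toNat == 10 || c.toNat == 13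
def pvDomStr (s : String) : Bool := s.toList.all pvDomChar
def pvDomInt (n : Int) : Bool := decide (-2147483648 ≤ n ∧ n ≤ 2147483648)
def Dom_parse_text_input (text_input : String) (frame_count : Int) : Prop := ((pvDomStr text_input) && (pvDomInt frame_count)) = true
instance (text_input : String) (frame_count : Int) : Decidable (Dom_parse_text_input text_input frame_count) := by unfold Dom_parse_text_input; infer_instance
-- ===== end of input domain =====

-- B replaces A's two passes (an all() validation pass, then a build loop) with one
-- Option-returning pass that skips blanks and bails to the fallback on the first bad
-- line (objective: alternative decomposition, same cost).


-- ===== PORT A =====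
-- literal port of A: filter non-blank lines, an all() validation pass, then a build pass;
-- split? "\n" is always some (sep ≠ ""), so .getD [] is exact; parts.headD ""/parts.getD 1 ""
-- are Python's parts[0]/parts[1], exact under the len(parts) == 2 guard.
def parse_text_input (text_input : String) (frame_count : Int) : (List (String × String)) × Bool :=
  let lines := ((PySem.Str.split? text_input "\n").getD []).filter
      (fun line => !(PySem.Str.strip line == ""))
  if lines.all (fun line => PySem.Str.isIn ":" line &&
      PySem.Str.strIsdigit (PySem.Str.replace (PySem.Str.strip
        (((PySem.Str.split? line ":").getD []).headD "")) "\"" "")) then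
    let d := lines.foldl (fun d line =>
      let parts := (PySem.Str.splitMax? line ":" 1).getD []
      if parts.length == 2 then
        d.insert (PySem.Str.replace (PySem.Str.strip (parts.headD "")) "\"" "")
                 (PySem.Str.replace (PySem.Str.replace (PySem.Str.strip (parts.getD 1 "")) "\"" "") "," "")
      else d) PySem.Dict.empty
    (d.items, true)
  else
    (((PySem.List.pyRange 1 (frame_count + 1) 1).foldl
        (fun d i => d.insert (PySem.Int.toStr i) text_input) PySem.Dict.empty).items, false)

-- ===== PORT B =====
-- _collect: one pass over the raw lines, 'continue' on blanks, None on a bad line.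
def pvCollect (table : PySem.Dict String String) : List String → Option (PySem.Dict String String)
  | [] => some table
  | line :: rest =>
    if PySem.Str.strip line == "" then pvCollect table rest
    else if !(PySem.Str.isIn ":" line) ||
        !(PySem.Str.strIsdigit (PySem.Str.replace (PySem.Str.strip
          (((PySem.Str.split? line ":").getD []).headD "")) "\"" "")) then
      none
    else
      pvCollect
        (let parts := (PySem.Str.splitMax? line ":" 1).getD []
         if parts.length == 2 then
           table.insert (PySem.Str.replace (PySem.Str.strip (parts.headD "")) "\"" "")
                        (PySem.Str.replace (PySem.Str.replace (PySem.Str.strip (parts.getD 1 "")) "\"" "") "," "")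
         else table) rest

-- dict.fromkeys(map(str, range(1, frame_count+1)), text_input) = map toStr, then insert each
def parse_text_input_alt (text_input : String) (frame_count : Int) : (List (String × String)) × Bool :=
  match pvCollect PySem.Dict.empty ((PySem.Str.split? text_input "\n").getD []) with
  | none =>
      ((((PySem.List.pyRange 1 (frame_count + 1) 1).map PySem.Int.toStr).foldl
          (fun d k => d.insert k text_input) PySem.Dict.empty).items, false)
  | some table => (table.items, true)

-- ===== PRECONDITION & SPEC =====
def Spec_parse_text_input (text_input : String) (frame_count : Int) (out : (List (String × String)) × Bool) : Prop := out = parse_text_input_alt text_input frame_count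
instance (text_input : String) (frame_count : Int) (out : (List (String × String)) × Bool) : Decidable (Spec_parse_text_input text_input frame_count out) := by unfold Spec_parse_text_input; infer_instance

-- ===== CLAIM (what is proved, stated in full; the proofs are below) =====
def Claim_equal_parse_text_input : Prop := ∀ (text_input : String) (frame_count : Int), Dom_parse_text_input text_input frame_count → Spec_parse_text_input text_input frame_count (parse_text_input text_input frame_count)

-- ===== LEMMAS AND PROOFS =====
-- proof-side abbreviations for the per-line pieces both programs share
def pKeep (line : String) : Bool := !(PySem.Str.strip line == "")
def pCond (line : String) : Bool := PySem.Str.isIn ":" line &&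
  PySem.Str.strIsdigit (PySem.Str.replace (PySem.Str.strip
    (((PySem.Str.split? line ":").getD []).headD "")) "\"" "")
def pStep (d : PySem.Dict String String) (line : String) : PySem.Dict String String :=
  let parts := (PySem.Str.splitMax? line ":" 1).getD []
  if parts.length == 2 then
    d.insert (PySem.Str.replace (PySem.Str.strip (parts.headD "")) "\"" "")
             (PySem.Str.replace (PySem.Str.replace (PySem.Str.strip (parts.getD 1 "")) "\"" "") "," "")
  else d

theorem pvBadCond (line : String) :
    (!(PySem.Str.isIn ":" line) ||
      !(PySem.Str.strIsdigit (PySem.Str.replace (PySem.Str.strip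
        (((PySem.Str.split? line ":").getD []).headD "")) "\"" ""))) = !pCond line := by
  simp [pCond]

theorem pvCollect_of_all (ls : List String) (d : PySem.Dict String String)
    (h : (ls.filter pKeep).all pCond = true) :
    pvCollect d ls = some ((ls.filter pKeep).foldl pStep d) := by
  induction ls generalizing d with
  | nil => simp [pvCollect]
  | cons l rest ih =>
    by_cases hk : PySem.Str.strip l == ""
    · have hk' : pKeep l = false := by simp [pKeep, hk]
      simp only [List.filter_cons, hk'] at h ⊢
      simp only [pvCollect, hk, if_true]
      exact ih d h
    · have hk' : pKeep l = true := by simp [pKeep, hk]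
      simp only [List.filter_cons, hk', if_true, List.all_cons, Bool.and_eq_true] at h ⊢
      have hc : pCond l = true := h.1
      simp only [pvCollect, hk, if_false, Bool.false_eq_true, pvBadCond, hc,
        Bool.not_true]
      simp only [List.foldl_cons]
      exact ih _ h.2

theorem pvCollect_none (ls : List String) (d : PySem.Dict String String)
    (h : (ls.filter pKeep).all pCond = false) :
    pvCollect d ls = none := by
  induction ls generalizing d with
  | nil => simp at h
  | cons l rest ih =>
    by_cases hk : PySem.Str.strip l == ""
    · have hk' : pKeep l = false := by simp [pKeep, hk]
      simp only [List.filter_cons, hk'] at h ⊢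
      simp only [pvCollect, hk, if_true]
      exact ih d h
    · have hk' : pKeep l = true := by simp [pKeep, hk]
      simp only [List.filter_cons, hk', if_true, List.all_cons] at h
      simp only [pvCollect, hk, if_false, Bool.false_eq_true, pvBadCond]
      by_cases hcT : pCond l = true
      · simp only [hcT, Bool.not_true, if_false, Bool.false_eq_true]
        apply ih
        simpa [hcT] using h
      · have hcF : pCond l = false := by
          cases hcv : pCond l
          · rfl
          · exact absurd hcv hcT
        simp [hcF]

-- ===== VERDICT (by name: the statement is the Claim_ definition above) =====
theorem parse_text_input_spec : Claim_equal_parse_text_input := by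
  intro text_input frame_count _
  show parse_text_input text_input frame_count = parse_text_input_alt text_input frame_count
  have ha : parse_text_input text_input frame_count =
      (if ((((PySem.Str.split? text_input "\n").getD []).filter pKeep).all pCond) then
        ((((((PySem.Str.split? text_input "\n").getD []).filter pKeep)).foldl pStep PySem.Dict.empty).items, true)
      else
        (((PySem.List.pyRange 1 (frame_count + 1) 1).foldl
            (fun d i => d.insert (PySem.Int.toStr i) text_input) PySem.Dict.empty).items, false)) := rfl
  rw [ha]
  unfold parse_text_input_alt
  by_cases h : (((PySem.Str.split? text_input "\n").getD []).filter pKeep).all pCond = true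
  · rw [if_pos h, pvCollect_of_all _ _ h]
  · have h' : (((PySem.Str.split? text_input "\n").getD []).filter pKeep).all pCond = false := by
      cases hcv : (((PySem.Str.split? text_input "\n").getD []).filter pKeep).all pCond
      · rfl
      · exact absurd hcv h
    rw [if_neg (by simp [h']), pvCollect_none _ _ h', List.foldl_map]
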